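-- pv_equiv track=rewrite | github.com/EdgarJGarcia/364-Lab2 | parallel2.py | partition_graph
-- ===== SOURCE A (Python) =====
-- def partition_graph(graph, num_parts):
--     nodes = list(graph.keys())
--     size = len(nodes) // num_parts
--     partitions = []
--     for i in range(num_parts):
--         part_nodes = nodes[i*size:(i+1)*size] if i < num_parts-1 else nodes[i*size:]
--         subgraph = {n: graph[n] for n in part_nodes}
--         partitions.append(subgraph)
--     return partitions
-- ===== SOURCE B (Python) =====
-- def partition_graph(graph, num_parts):
--     size = len(graph) // num_parts
--     boundary = (num_parts - 1) * size
--     partitions = [{} for _ in range(num_parts)]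
--     for i, n in enumerate(graph):
--         partitions[num_parts - 1 if i >= boundary else i // size][n] = graph[n]
--     return partitions
-- ===== Notes on version B (the rewrite author's own statement) =====
-- stated objective: alternative
-- what changed: Replaces A's per-partition slicing loop (one slice and dict comprehension per partition) with a single node-driven pass that pre-creates the empty partition dicts and buckets each node by computing its partition index arithmetically.
-- outside the precondition, e.g. on partition_graph({1: []}, -1): A returns [], B raises IndexError
import Mathlib
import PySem

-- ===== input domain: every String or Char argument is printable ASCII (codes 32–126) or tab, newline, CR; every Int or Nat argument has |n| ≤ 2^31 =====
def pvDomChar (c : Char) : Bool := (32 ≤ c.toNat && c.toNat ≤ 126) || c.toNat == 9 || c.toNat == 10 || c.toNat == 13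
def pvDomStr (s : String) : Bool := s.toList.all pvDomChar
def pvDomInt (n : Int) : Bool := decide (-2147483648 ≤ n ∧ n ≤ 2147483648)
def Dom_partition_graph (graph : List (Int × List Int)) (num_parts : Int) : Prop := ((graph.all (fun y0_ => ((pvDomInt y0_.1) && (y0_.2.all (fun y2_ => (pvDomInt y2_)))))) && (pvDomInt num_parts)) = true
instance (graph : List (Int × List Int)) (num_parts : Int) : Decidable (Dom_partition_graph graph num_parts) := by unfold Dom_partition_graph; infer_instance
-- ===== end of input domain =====

-- B replaces A's per-partition slicing loop with a single node-driven bucketing pass (alternative decomposition, same cost).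


-- ===== PORT A =====
-- Literal transliteration of A: nodes = list(graph.keys()); size = len(nodes) // num_parts;
-- for i in range(num_parts): slice out the i-th block of nodes and build its subgraph dict.
-- graph[n] is ported as Dict.getD g n []: n is always drawn from g's own keys, so the lookup
-- never hits the KeyError/default case.
def partition_graph (graph : List (Int × List Int)) (num_parts : Int) : List (List (Int × List Int)) :=
  let g := PySem.Dict.ofList graph
  let nodes := PySem.Dict.keys g
  let size := PySem.Int.floordiv (nodes.length : Int) num_parts   -- num_parts ≠ 0 required by Pre_ (ZeroDivisionError)
  (PySem.List.pyRange 0 num_parts 1).foldl (fun partitions i =>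
    let part_nodes := if i < num_parts - 1
      then PySem.List.slice nodes (some (i * size)) (some ((i + 1) * size))
      else PySem.List.slice nodes (some (i * size)) none
    let subgraph := part_nodes.foldl (fun d n => PySem.Dict.insert d n (PySem.Dict.getD g n [])) PySem.Dict.empty
    partitions ++ [subgraph.items]) []

-- ===== PORT B =====
-- Literal transliteration of B (Source B): pre-create num_parts empty dicts, then one pass over
-- enumerate(graph) assigning each node to partitions[num_parts-1 if i >= boundary else i // size].
-- partitions[idx] read/write is ported with pyGetD/pySetD; Pre_ guarantees 0 ≤ idx < num_parts
-- so the default/no-op cases are never hit.  graph[n] as in port A.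
def partition_graph_alt (graph : List (Int × List Int)) (num_parts : Int) : List (List (Int × List Int)) :=
  let g := PySem.Dict.ofList graph
  let size := PySem.Int.floordiv (PySem.Dict.size g : Int) num_parts   -- num_parts ≠ 0 required by Pre_
  let boundary := (num_parts - 1) * size
  let init : List (PySem.Dict Int (List Int)) := (PySem.List.pyRange 0 num_parts 1).map (fun _ => PySem.Dict.empty)
  let final := (PySem.List.enumerate (PySem.Dict.keys g) 0).foldl (fun partitions p =>
    let idx := if boundary ≤ p.1 then num_parts - 1 else PySem.Int.floordiv p.1 size
    PySem.List.pySetD partitions idx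
      ((PySem.List.pyGetD partitions idx PySem.Dict.empty).insert p.2 (PySem.Dict.getD g p.2 []))) init
  final.map PySem.Dict.items

-- ===== PRECONDITION & SPEC =====
-- Pre_ excludes num_parts = 0 (A raises ZeroDivisionError) and negative num_parts with a
-- nonempty graph, where A's empty range silently returns [] discarding every node while B's
-- bucketing raises IndexError (cite: ({1: []}, -1) → A returns [], B raises IndexError).
def Pre_partition_graph (graph : List (Int × List Int)) (num_parts : Int) : Prop :=
  0 < num_parts ∨ (graph = [] ∧ num_parts < 0)
instance (graph : List (Int × List Int)) (num_parts : Int) : Decidable (Pre_partition_graph graph num_parts) := by unfold Pre_partition_graph; infer_instance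
def pvWitness_partition_graph : (List (Int × List Int)) × Int := ([(1, [2, 3]), (2, []), (3, [1])], 2)
def Spec_partition_graph (graph : List (Int × List Int)) (num_parts : Int) (out : List (List (Int × List Int))) : Prop := out = partition_graph_alt graph num_parts
instance (graph : List (Int × List Int)) (num_parts : Int) (out : List (List (Int × List Int))) : Decidable (Spec_partition_graph graph num_parts out) := by unfold Spec_partition_graph; infer_instance

-- ===== CLAIM (what is proved, stated in full; the proofs are below) =====
def Claim_equal_partition_graph : Prop := ∀ (graph : List (Int × List Int)) (num_parts : Int), Dom_partition_graph graph num_parts → Pre_partition_graph graph num_parts → Spec_partition_graph graph num_parts (partition_graph graph num_parts)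

-- ===== LEMMAS AND PROOFS =====

-- first components of enumerate xs s are ≥ s
theorem pv_enum_fst_le {α : Type} (xs : List α) (s : Int) (p : Int × α)
    (hp : p ∈ PySem.List.enumerate xs s) : s ≤ p.1 := by
  induction xs generalizing s with
  | nil => simp [PySem.List.enumerate_nil] at hp
  | cons x xs ih =>
    rw [PySem.List.enumerate_cons] at hp
    rcases List.mem_cons.1 hp with h | h
    · subst h; simp
    · have := ih (s + 1) h; omega

-- filtering enumerate by a lower bound on the index is a drop
theorem pv_filter_enum_lb {α : Type} (xs : List α) (s a : Int) :
    (((PySem.List.enumerate xs s).filter (fun p => decide (a ≤ p.1))).map (·.2))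
      = xs.drop (a - s).toNat := by
  induction xs generalizing s with
  | nil => simp [PySem.List.enumerate_nil]
  | cons x xs ih =>
    rw [PySem.List.enumerate_cons]
    by_cases h : a ≤ s
    · have h0 : (a - s).toNat = 0 := by omega
      have h1 : (a - (s + 1)).toNat = 0 := by omega
      simp [List.filter_cons, h, ih (s + 1), h0, h1]
    · have h0 : (a - s).toNat = (a - (s + 1)).toNat + 1 := by omega
      simp [List.filter_cons, h, ih (s + 1), h0]

-- filtering enumerate by an index interval is a take-then-drop
theorem pv_filter_enum_interval {α : Type} (xs : List α) (s a b : Int) :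
    (((PySem.List.enumerate xs s).filter (fun p => decide (a ≤ p.1) && decide (p.1 < b))).map (·.2))
      = (xs.take (b - s).toNat).drop (a - s).toNat := by
  induction xs generalizing s with
  | nil => simp [PySem.List.enumerate_nil]
  | cons x xs ih =>
    rw [PySem.List.enumerate_cons]
    by_cases hb : s < b
    · have hbt : (b - s).toNat = (b - (s + 1)).toNat + 1 := by omega
      by_cases ha : a ≤ s
      · have h0 : (a - s).toNat = 0 := by omega
        have h1 : (a - (s + 1)).toNat = 0 := by omega
        simp [List.filter_cons, ha, hb, ih (s + 1), h0, h1, hbt]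
      · have h0 : (a - s).toNat = (a - (s + 1)).toNat + 1 := by omega
        simp [List.filter_cons, ha, ih (s + 1), h0, hbt]
    · have hbt : (b - s).toNat = 0 := by omega
      have : ∀ p ∈ PySem.List.enumerate (x :: xs) s, (decide (a ≤ p.1) && decide (p.1 < b)) = false := by
        intro p hp
        have := pv_enum_fst_le (x :: xs) s p hp
        simp; omega
      rw [List.filter_eq_nil_iff.2 (by intro p hp; simp only [this p hp]; simp)]
      simp [hbt]

-- a fold of in-range pySetD updates preserves the length
theorem pv_length_foldl_pySetD {α β : Type} (xs : List β) (S : List α)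
    (ix : β → Int) (v : List α → β → α) :
    (xs.foldl (fun S p => PySem.List.pySetD S (ix p) (v S p)) S).length = S.length := by
  induction xs generalizing S with
  | nil => rfl
  | cons x xs ih => rw [List.foldl_cons, ih]; exact PySem.List.length_pySetD _ _ _

-- reading back one bucket after a bucketed update
theorem pv_pyGetD_pySetD_int {α : Type} (S : List α) (a j : Int) (v : α) (d : α)
    (ha0 : 0 ≤ a) (ha : a < (S.length : Int)) (hj0 : 0 ≤ j) (hj : j < (S.length : Int)) :
    PySem.List.pyGetD (PySem.List.pySetD S a v) j d = if j = a then v else PySem.List.pyGetD S j d := by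
  rw [PySem.List.pySetD_of_nonneg _ _ ha0,
      PySem.List.pyGetD_eq_getElem _ _ hj0 (by simpa using hj),
      List.getElem_set]
  split_ifs with h1 h2 h2
  · rfl
  · omega
  · omega
  · rw [PySem.List.pyGetD_eq_getElem _ _ hj0 hj]

-- the single-pass bucketing fold, read at bucket j, is a fold over the j-bucket entries
theorem pv_bucket_foldl (ix : Int → Int) (w : Int → List Int) (xs : List (Int × Int))
    (S : List (PySem.Dict Int (List Int))) (j : Int)
    (hx : ∀ p ∈ xs, 0 ≤ ix p.1 ∧ ix p.1 < (S.length : Int))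
    (hj0 : 0 ≤ j) (hj : j < (S.length : Int)) :
    PySem.List.pyGetD
      (xs.foldl (fun parts p =>
        PySem.List.pySetD parts (ix p.1)
          ((PySem.List.pyGetD parts (ix p.1) PySem.Dict.empty).insert p.2 (w p.2))) S)
      j PySem.Dict.empty
    = (xs.filter (fun p => decide (ix p.1 = j))).foldl
        (fun d p => d.insert p.2 (w p.2)) (PySem.List.pyGetD S j PySem.Dict.empty) := by
  induction xs generalizing S with
  | nil => rfl
  | cons x xs ih =>
    have hx0 := hx x (List.mem_cons_self)
    have hlen : (PySem.List.pySetD S (ix x.1)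
        ((PySem.List.pyGetD S (ix x.1) PySem.Dict.empty).insert x.2 (w x.2))).length = S.length :=
      PySem.List.length_pySetD _ _ _
    rw [List.foldl_cons, List.filter_cons]
    by_cases h : ix x.1 = j
    · simp only [h, decide_true, if_pos, List.foldl_cons]
      rw [ih _ (by intro p hp; simpa [hlen] using hx p (List.mem_cons_of_mem _ hp)) (by simpa [hlen] using hj)]
      rw [pv_pyGetD_pySetD_int _ _ _ _ _ (h ▸ hx0.1) (h ▸ hx0.2) hj0 hj, if_pos rfl]
    · simp only [h, decide_false, if_neg, Bool.false_eq_true, not_false_iff]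
      rw [ih _ (by intro p hp; simpa [hlen] using hx p (List.mem_cons_of_mem _ hp)) (by simpa [hlen] using hj)]
      rw [pv_pyGetD_pySetD_int _ _ _ _ _ hx0.1 hx0.2 hj0 hj, if_neg (by omega)]

-- a fold over pairs that only uses the second component is a fold over the seconds
theorem pv_foldl_snd (w : Int → List Int) (l : List (Int × Int)) (init : PySem.Dict Int (List Int)) :
    l.foldl (fun d p => d.insert p.2 (w p.2)) init
      = (l.map (·.2)).foldl (fun d n => d.insert n (w n)) init :=
  (List.foldl_map (f := fun p : Int × Int => p.2) (g := fun d n => PySem.Dict.insert d n (w n))).symm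

-- characterisation of B's bucket index
theorem pv_idx_bounds (k size i : Int) (hk : 0 < k) (hs : 0 ≤ size) (hi : 0 ≤ i) :
    0 ≤ (if (k - 1) * size ≤ i then k - 1 else PySem.Int.floordiv i size)
    ∧ (if (k - 1) * size ≤ i then k - 1 else PySem.Int.floordiv i size) < k := by
  split_ifs with h
  · omega
  · have hsz : 0 < size := by
      rcases lt_or_eq_of_le hs with h' | h'
      · exact h'
      · exfalso; apply h; nlinarith
    constructor
    · rw [PySem.Int.floordiv_eq_ediv_of_pos hsz]; exact Int.ediv_nonneg hi (le_of_lt hsz)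
    · have : PySem.Int.floordiv i size < k - 1 := by
        rw [PySem.Int.floordiv_lt_iff_lt_mul hsz]; omega
      omega

theorem pv_idx_eq_last (k size i : Int) (hk : 0 < k) (hs : 0 ≤ size) (hi : 0 ≤ i) :
    ((if (k - 1) * size ≤ i then k - 1 else PySem.Int.floordiv i size) = k - 1)
    ↔ (k - 1) * size ≤ i := by
  split_ifs with h
  · simp [h]
  · have hsz : 0 < size := by
      rcases lt_or_eq_of_le hs with h' | h'
      · exact h'
      · exfalso; apply h; nlinarith
    have : PySem.Int.floordiv i size < k - 1 := by
      rw [PySem.Int.floordiv_lt_iff_lt_mul hsz]; omega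
    constructor
    · omega
    · intro hc; exact absurd hc h

theorem pv_idx_eq_mid (k size i j : Int) (hk : 0 < k) (hs : 0 ≤ size) (hi : 0 ≤ i)
    (hj0 : 0 ≤ j) (hjk : j < k - 1) :
    ((if (k - 1) * size ≤ i then k - 1 else PySem.Int.floordiv i size) = j)
    ↔ (j * size ≤ i ∧ i < (j + 1) * size) := by
  split_ifs with h
  · constructor
    · omega
    · rintro ⟨h1, h2⟩
      exfalso
      have : (j + 1) * size ≤ (k - 1) * size := by nlinarith
      omega
  · have hsz : 0 < size := by
      rcases lt_or_eq_of_le hs with h' | h'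
      · exact h'
      · exfalso; apply h; nlinarith
    rw [PySem.Int.floordiv_eq_iff_of_pos hsz]

theorem partition_graph_main (graph : List (Int × List Int)) (num_parts : Int)
    (hk : 0 < num_parts) :
    partition_graph graph num_parts = partition_graph_alt graph num_parts := by
  simp only [partition_graph, partition_graph_alt]
  set g := PySem.Dict.ofList graph with hg
  set nodes := PySem.Dict.keys g with hnodes
  have hsize_eq : (PySem.Dict.size g : Int) = (nodes.length : Int) := by
    simp [hnodes, PySem.Dict.keys, PySem.Dict.size]
  rw [hsize_eq]
  set k := num_parts with hkdef
  set size := PySem.Int.floordiv (nodes.length : Int) k with hsizedef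
  have hL : (0 : Int) ≤ (nodes.length : Int) := by positivity
  have hs : 0 ≤ size := by
    rw [hsizedef, PySem.Int.floordiv_eq_ediv_of_pos hk]
    exact Int.ediv_nonneg hL (le_of_lt hk)
  -- A's loop is a map over range(num_parts)
  rw [PySem.List.foldl_append_singleton_eq_map]
  -- B: show the final state is the same list of dicts, bucket by bucket
  set init : List (PySem.Dict Int (List Int)) := (PySem.List.pyRange 0 k 1).map (fun _ => PySem.Dict.empty) with hinit
  set ix : Int → Int := fun i => if (k - 1) * size ≤ i then k - 1 else PySem.Int.floordiv i size with hix
  set w : Int → List Int := fun n => PySem.Dict.getD g n [] with hw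
  set F := (PySem.List.enumerate nodes 0).foldl (fun parts p =>
      PySem.List.pySetD parts (ix p.1)
        ((PySem.List.pyGetD parts (ix p.1) PySem.Dict.empty).insert p.2 (w p.2))) init with hF
  have hinitlen : init.length = k.toNat := by
    simp [hinit, PySem.List.length_pyRange_one]
  have hFlen : F.length = k.toNat := by
    rw [hF, pv_length_foldl_pySetD, hinitlen]
  have hrangelen : (PySem.List.pyRange 0 k 1).length = k.toNat := by
    simp [PySem.List.length_pyRange_one]
  have hmem : ∀ p ∈ PySem.List.enumerate nodes 0, 0 ≤ ix p.1 ∧ ix p.1 < (init.length : Int) := by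
    intro p hp
    have hi : 0 ≤ p.1 := pv_enum_fst_le nodes 0 p hp
    have hb := pv_idx_bounds k size p.1 hk hs hi
    have hxeq : ix p.1 = if (k - 1) * size ≤ p.1 then k - 1 else PySem.Int.floordiv p.1 size := by
      rw [hix]
    rw [hxeq, hinitlen]
    exact ⟨hb.1, by push_cast; omega⟩
  -- pointwise equality of the two lists of subgraph dicts
  have key : F = (PySem.List.pyRange 0 k 1).map (fun i =>
      (if i < k - 1
        then PySem.List.slice nodes (some (i * size)) (some ((i + 1) * size))
        else PySem.List.slice nodes (some (i * size)) none).foldl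
        (fun d n => PySem.Dict.insert d n (PySem.Dict.getD g n [])) PySem.Dict.empty) := by
    apply List.ext_getElem
    · rw [hFlen, List.length_map, hrangelen]
    · intro t h1 h2
      have ht : t < k.toNat := by rwa [hFlen] at h1
      have hjk : ((t : Int)) < k := by omega
      have hj0 : (0 : Int) ≤ (t : Int) := by positivity
      have hget : F[t] = PySem.List.pyGetD F (t : Int) PySem.Dict.empty := by
        rw [PySem.List.pyGetD_eq_getElem _ _ hj0 (by rw [hFlen]; omega)]
        simp
      rw [hget, hF, pv_bucket_foldl ix w _ init (t : Int) hmem hj0 (by rw [hinitlen]; omega)]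
      have hinitget : PySem.List.pyGetD init (t : Int) PySem.Dict.empty = PySem.Dict.empty := by
        rw [PySem.List.pyGetD_eq_getElem _ _ hj0 (by rw [hinitlen]; omega)]
        simp [hinit]
      rw [hinitget]
      have hrget : (PySem.List.pyRange 0 k 1)[t]'(by rw [hrangelen]; exact ht) = (t : Int) := by
        rw [PySem.List.getElem_pyRange_one]; omega
      rw [List.getElem_map]
      rw [hrget]
      -- reduce the filtered fold over pairs to a fold over the node slice
      rw [pv_foldl_snd w]
      simp only [hw]
      congr 1
      by_cases hcase : (t : Int) < k - 1
      · rw [if_pos hcase]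
        have hfc : ∀ p ∈ PySem.List.enumerate nodes 0,
            (decide (ix p.1 = (t : Int)))
              = (decide ((t : Int) * size ≤ p.1) && decide (p.1 < ((t : Int) + 1) * size)) := by
          intro p hp
          have hi : 0 ≤ p.1 := pv_enum_fst_le nodes 0 p hp
          have := pv_idx_eq_mid k size p.1 (t : Int) hk hs hi hj0 hcase
          rw [hix]
          by_cases hh : (if (k - 1) * size ≤ p.1 then k - 1 else PySem.Int.floordiv p.1 size) = (t : Int)
          · simp only [hh, decide_true]
            have := this.1 hh
            simp [this.1, this.2]
          · simp only [hh, decide_false]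
            rcases not_and_or.1 (fun hc => hh (this.2 ⟨hc.1, hc.2⟩)) with hc | hc
            · simp [hc]
            · simp [hc]
        rw [List.filter_congr hfc, pv_filter_enum_interval nodes 0 ((t : Int) * size) (((t : Int) + 1) * size)]
        rw [PySem.List.slice_toNat _ (by positivity) (by positivity)]
        rw [List.drop_take]
        simp only [sub_zero]
      · rw [if_neg hcase]
        have hteq : (t : Int) = k - 1 := by omega
        have hfc : ∀ p ∈ PySem.List.enumerate nodes 0,
            (decide (ix p.1 = (t : Int))) = (decide ((k - 1) * size ≤ p.1)) := by
          intro p hp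
          have hi : 0 ≤ p.1 := pv_enum_fst_le nodes 0 p hp
          have := pv_idx_eq_last k size p.1 hk hs hi
          rw [hix, hteq]
          by_cases hh : (if (k - 1) * size ≤ p.1 then k - 1 else PySem.Int.floordiv p.1 size) = k - 1
          · simp [hh, this.1 hh]
          · simp only [hh, decide_false]
            have : ¬ (k - 1) * size ≤ p.1 := fun hc => hh (this.2 hc)
            simp [this]
        rw [List.filter_congr hfc, pv_filter_enum_lb nodes 0 ((k - 1) * size)]
        rw [PySem.List.slice_from _ (by positivity), hteq]
        simp only [sub_zero]
  rw [key, List.map_map]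
  rfl

-- ===== VERDICT (by name: the statement is the Claim_ definition above) =====
theorem partition_graph_spec : Claim_equal_partition_graph := by
  intro graph num_parts _hdom hpre
  unfold Spec_partition_graph
  rcases hpre with hk | ⟨hnil, hkneg⟩
  · exact partition_graph_main graph num_parts hk
  · subst hnil
    have hr : PySem.List.pyRange 0 num_parts 1 = [] :=
      PySem.List.pyRange_one_eq_nil (by omega)
    simp [partition_graph, partition_graph_alt, hr, PySem.Dict.ofList, PySem.Dict.keys,
]
    rfl
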